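-- pv_equiv track=rewrite | github.com/rjbatista/AoC | aoc/event2015/day15/solve.py | try_all
-- ===== SOURCE A (Python) =====
-- def try_all(remaining, subset):
--     if (len(subset) == 1):
--         return [[tuple((remaining, subset[0]))]]
--     elif (len(subset) == remaining):
--         return [[tuple((1, each)) for each in subset]]
--
--     combs = []
--     for i in range(remaining - (len(subset) - 1), 0, -1):
--         others = try_all(remaining - i, subset[1:])
--         combs += [[(i, subset[0])] + other for other in others]
--
--     return combs
-- ===== SOURCE B (Python) =====
-- def try_all(remaining, subset):
--     # Iterative frontier expansion: build all assignments level by level over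
--     # subset[:-1], carrying (parts_so_far, remaining) pairs; the last element
--     # absorbs whatever is left.
--     partials = [([], remaining)]
--     for idx, elem in enumerate(subset[:-1]):
--         slots_after = len(subset) - 1 - idx
--         nxt = []
--         for acc, rem in partials:
--             for i in range(rem - slots_after, 0, -1):
--                 nxt.append((acc + [(i, elem)], rem - i))
--         partials = nxt
--     return [acc + [(rem, subset[-1])] for acc, rem in partials]
-- ===== Notes on version B (the rewrite author's own statement) =====
-- stated objective: alternative
-- what changed: Replaces A's recursion over the subset (with a len(subset)==remaining shortcut branch) by an iterative level-by-level frontier expansion over subset[:-1] carrying (partial composition, remaining) pairs, the last element absorbing the leftover.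
-- outside the precondition, e.g. on try_all(0, []): A returns [[]], B raises IndexError; on try_all(-1, []): A returns [], B raises IndexError
import Mathlib
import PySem

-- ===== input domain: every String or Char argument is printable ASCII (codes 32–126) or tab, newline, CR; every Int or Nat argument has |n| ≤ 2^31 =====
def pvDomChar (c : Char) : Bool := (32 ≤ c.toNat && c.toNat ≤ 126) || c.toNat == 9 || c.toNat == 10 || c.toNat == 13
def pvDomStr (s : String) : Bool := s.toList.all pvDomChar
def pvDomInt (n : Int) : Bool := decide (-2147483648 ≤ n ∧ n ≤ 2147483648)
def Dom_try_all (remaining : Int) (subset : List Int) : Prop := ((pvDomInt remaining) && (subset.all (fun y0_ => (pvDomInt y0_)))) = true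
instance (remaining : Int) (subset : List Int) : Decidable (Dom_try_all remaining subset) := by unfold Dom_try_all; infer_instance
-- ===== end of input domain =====

-- B replaces A's recursion by an iterative level-by-level frontier expansion (alternative, not faster).

-- ===== PORT A =====
-- Python tuples (i, e) are ported as two-element lists [i, e] per the required result type.
def try_all (remaining : Int) (subset : List Int) : List (List (List Int)) :=
  match subset with
  | [] => []  -- Python raises IndexError here for remaining ≥ 1 (degenerate [] / [[]] otherwise); excluded by Pre_
  | x :: rest =>
    if rest.length = 0 then
      [[[remaining, x]]]
    else if (((x :: rest).length : Int)) = remaining then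
      [(x :: rest).map (fun each => [1, each])]
    else
      (PySem.List.pyRange (remaining - (((x :: rest).length : Int) - 1)) 0 (-1)).foldl
        (fun combs i =>
          combs ++ (try_all (remaining - i) rest).map (fun other => [i, x] :: other)) []

-- ===== PORT B =====
-- body of B's inner double loop over the current frontier (one level)
def altStep (n : Int) (partials : List (List (List Int) × Int)) (p : Int × Int) : List (List (List Int) × Int) :=
  partials.foldl (fun nxt q =>
      nxt ++ (PySem.List.pyRange (q.2 - (n - 1 - p.1)) 0 (-1)).map
        (fun i => (q.1 ++ [[i, p.2]], q.2 - i))) []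

def try_all_alt (remaining : Int) (subset : List Int) : List (List (List Int)) :=
  let partials := (PySem.List.enumerate subset.dropLast 0).foldl
      (altStep (subset.length : Int)) [([], remaining)]
  match subset.getLast? with
  | some last => partials.map (fun q => q.1 ++ [[q.2, last]])
  | none => []  -- Python raises IndexError (subset[-1]); excluded by Pre_

-- ===== PRECONDITION & SPEC =====
-- Pre_ excludes the empty subset, on which B (subset[-1]) raises IndexError while A raises
-- IndexError for remaining ≥ 1 and returns accidental degenerate values ([] or [[]]) otherwise.
def Pre_try_all (remaining : Int) (subset : List Int) : Prop := subset ≠ []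
instance (remaining : Int) (subset : List Int) : Decidable (Pre_try_all remaining subset) := by unfold Pre_try_all; infer_instance
def pvWitness_try_all : Int × List Int := (5, [10, 20])

def Spec_try_all (remaining : Int) (subset : List Int) (out : List (List (List Int))) : Prop := out = try_all_alt remaining subset
instance (remaining : Int) (subset : List Int) (out : List (List (List Int))) : Decidable (Spec_try_all remaining subset out) := by unfold Spec_try_all; infer_instance

-- ===== CLAIM (what is proved, stated in full; the proofs are below) =====
def Claim_equal_try_all : Prop := ∀ (remaining : Int) (subset : List Int), Dom_try_all remaining subset → Pre_try_all remaining subset → Spec_try_all remaining subset (try_all remaining subset)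

-- ===== LEMMAS AND PROOFS =====

lemma altStep_eq_flatMap (n : Int) (P : List (List (List Int) × Int)) (p : Int × Int) :
    altStep n P p = P.flatMap (fun q =>
      (PySem.List.pyRange (q.2 - (n - 1 - p.1)) 0 (-1)).map
        (fun i => (q.1 ++ [[i, p.2]], q.2 - i))) := by
  simpa [altStep] using
    PySem.List.foldl_append_eq_flatMap
      (g := fun q => (PySem.List.pyRange (q.2 - (n - 1 - p.1)) 0 (-1)).map
        (fun i => (q.1 ++ [[i, p.2]], q.2 - i))) (l := P) (acc := [])

lemma fold_split (n : Int) (l : List (Int × Int)) :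
    ∀ P : List (List (List Int) × Int),
      l.foldl (altStep n) P = P.flatMap (fun q => l.foldl (altStep n) [q]) := by
  induction l with
  | nil => intro P; simp
  | cons a l ih =>
    intro P
    simp only [List.foldl_cons]
    rw [ih (altStep n P a), altStep_eq_flatMap, List.flatMap_assoc]
    congr 1
    funext q
    rw [← ih, altStep_eq_flatMap]
    simp

lemma try_all_len (s : List Int) (hs : s ≠ []) :
    try_all (s.length : Int) s = [s.map (fun e => [1, e])] := by
  match s with
  | [] => exact absurd rfl hs
  | [x] => simp [try_all]
  | x :: y :: t => simp [try_all]

lemma try_all_cons (r : Int) (x : Int) (rest : List Int) (h : rest ≠ []) :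
    try_all r (x :: rest) =
      (PySem.List.pyRange (r - (rest.length : Int)) 0 (-1)).flatMap
        (fun i => (try_all (r - i) rest).map (fun other => [i, x] :: other)) := by
  rw [try_all]
  have hlen : rest.length ≠ 0 := by
    intro h0; exact h (List.eq_nil_of_length_eq_zero h0)
  rw [if_neg hlen]
  by_cases hr : (((x :: rest).length : Int)) = r
  · rw [if_pos hr]
    have h1 : r - (rest.length : Int) = 1 := by
      simp only [List.length_cons] at hr; push_cast at hr; omega
    rw [h1]
    have h2 : PySem.List.pyRange 1 0 (-1) = [1] := by decide
    rw [h2]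
    have h3 : r - 1 = (rest.length : Int) := by
      simp only [List.length_cons] at hr; push_cast at hr; omega
    simp [h3, try_all_len rest h]
  · rw [if_neg hr]
    have h4 : r - (((x :: rest).length : Int) - 1) = r - (rest.length : Int) := by
      simp only [List.length_cons]; push_cast; ring
    rw [h4,
      PySem.List.foldl_append_eq_flatMap
        (g := fun i => (try_all (r - i) rest).map (fun other => [i, x] :: other))]
    simp

lemma alt_main (elems : List Int) :
    ∀ (n o rem : Int) (acc : List (List Int)) (last : Int),
      n = o + (elems.length : Int) + 1 →
      ((PySem.List.enumerate elems o).foldl (altStep n) [(acc, rem)]).map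
          (fun q => q.1 ++ [[q.2, last]])
        = (try_all rem (elems ++ [last])).map (fun l => acc ++ l) := by
  induction elems with
  | nil =>
    intro n o rem acc last hn
    simp [PySem.List.enumerate_nil, try_all]
  | cons e es ih =>
    intro n o rem acc last hn
    rw [PySem.List.enumerate_cons, List.foldl_cons, fold_split, altStep_eq_flatMap]
    simp only [List.flatMap_singleton, List.map_flatMap, List.flatMap_map, List.cons_append]
    have hlast : es ++ [last] ≠ [] := by simp
    rw [try_all_cons rem e (es ++ [last]) hlast, List.map_flatMap]
    have harg : rem - ((es ++ [last]).length : Int) = rem - (n - 1 - o) := by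
      simp only [List.length_append, List.length_cons, List.length_nil] at *
      push_cast at hn ⊢; omega
    rw [harg]
    congr 1
    funext i
    have hn' : n = (o + 1) + (es.length : Int) + 1 := by
      simp only [List.length_cons] at hn; push_cast at hn ⊢; omega
    have := ih n (o + 1) (rem - i) (acc ++ [[i, e]]) last hn'
    rw [this, List.map_map]
    congr 1
    funext l
    simp

-- ===== VERDICT (by name: the statement is the Claim_ definition above) =====
theorem try_all_spec : Claim_equal_try_all := by
  intro r subset _hdom hpre
  unfold Spec_try_all
  obtain ⟨elems, last, rfl⟩ : ∃ elems last, subset = elems ++ [last] := by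
    rcases List.eq_nil_or_concat subset with h | ⟨l, a, h⟩
    · exact absurd h hpre
    · exact ⟨l, a, by simpa using h⟩
  unfold try_all_alt
  simp only [List.getLast?_concat, List.dropLast_concat]
  have hn : ((elems ++ [last]).length : Int) = 0 + (elems.length : Int) + 1 := by
    simp
  rw [hn, alt_main elems _ 0 r [] last rfl]
  simp
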